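-- pv_equiv track=rewrite | github.com/Kenji-Leb/foundations-cs-python | assignment_02_Abbas_Kanj.py | countTags
-- ===== SOURCE A (Python) =====
-- def countTags(html, tag):
--     start_tag = "<" + tag
--     end_tag = "</" + tag + ">"
--     count = 0
--
--     start_index = html.find(start_tag)
--
--     while start_index != -1:
--         end_index = html.find(end_tag, start_index)
--         if end_index == -1:
--             break
--
--         count += 1
--         start_index = html.find(start_tag, end_index + len(end_tag))
--
--     return count
-- ===== SOURCE B (Python) =====
-- def countTags(html, tag):
--     # Single left-to-right scan with a two-state machine instead of repeated str.find calls.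
--     start_tag = "<" + tag
--     end_tag = "</" + tag + ">"
--     count = 0
--     i = 0
--     n = len(html)
--     seeking_end = False
--     while i < n:
--         if seeking_end:
--             if html.startswith(end_tag, i):
--                 count += 1
--                 i += len(end_tag)
--                 seeking_end = False
--             else:
--                 i += 1
--         else:
--             if html.startswith(start_tag, i):
--                 seeking_end = True
--             else:
--                 i += 1
--     return count
-- ===== Notes on version B (the rewrite author's own statement) =====
-- stated objective: alternative
-- what changed: Replaced the nested str.find loop by a single left-to-right character scan with a two-state (seeking start / seeking end) machine and startswith checks.
import Mathlib
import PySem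

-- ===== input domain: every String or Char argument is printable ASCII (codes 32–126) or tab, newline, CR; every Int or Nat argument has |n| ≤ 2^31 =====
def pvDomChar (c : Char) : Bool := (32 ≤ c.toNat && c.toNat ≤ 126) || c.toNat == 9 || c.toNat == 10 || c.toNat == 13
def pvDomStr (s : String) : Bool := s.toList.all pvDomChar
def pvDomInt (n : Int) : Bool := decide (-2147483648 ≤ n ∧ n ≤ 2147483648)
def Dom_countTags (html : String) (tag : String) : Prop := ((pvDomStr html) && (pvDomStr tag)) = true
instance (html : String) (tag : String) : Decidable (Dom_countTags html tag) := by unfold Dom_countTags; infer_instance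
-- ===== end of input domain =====

-- B replaces A's nested str.find loop by one left-to-right scan with a two-state machine; same cost, no speed claim.

-- ===== PORT A =====

-- general bounds on Chars.findFrom, needed by loopA's decreasing_by
theorem pvFF_bound (l sub : List Char) (t : Int) :
    PySem.Chars.findFrom l sub t none = -1 ∨
      (max t 0 ≤ PySem.Chars.findFrom l sub t none ∧ PySem.Chars.findFrom l sub t none ≤ l.length) := by
  simp only [PySem.Chars.findFrom]
  have h1 := PySem.Chars.neg_one_le_find (List.drop (if t < 0 then if t + ↑l.length < 0 then 0 else t + ↑l.length else t).toNat (List.take ((l.length : Int)).toNat l)) sub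
  have h2 := PySem.Chars.find_le_length (List.drop (if t < 0 then if t + ↑l.length < 0 then 0 else t + ↑l.length else t).toNat (List.take ((l.length : Int)).toNat l)) sub
  generalize hr : PySem.Chars.find (List.drop (if t < 0 then if t + ↑l.length < 0 then 0 else t + ↑l.length else t).toNat (List.take ((l.length : Int)).toNat l)) sub = r at h1 h2 ⊢
  clear hr
  simp only [List.length_drop, List.length_take, Int.toNat_natCast, min_self] at h2
  have hst1 : t ≤ (if t < 0 then if t + ↑l.length < 0 then 0 else t + ↑l.length else t) := by
    split_ifs <;> omega
  have hst2 : (0:Int) ≤ (if t < 0 then if t + ↑l.length < 0 then 0 else t + ↑l.length else t) := by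
    split_ifs <;> omega
  generalize hq : (if t < 0 then if t + ↑l.length < 0 then 0 else t + ↑l.length else t) = st at hst1 hst2 h2 ⊢
  clear hq
  by_cases hlt : (l.length : Int) < st
  · left; rw [if_pos hlt]
  · rw [if_neg hlt]
    by_cases hr1 : r = -1
    · left; rw [if_pos hr1]
    · rw [if_neg hr1]
      right
      have h0r : (0:Int) ≤ r := Int.lt_iff_add_one_le.mp (lt_of_le_of_ne h1 (Ne.symm hr1))
      have hstL : st.toNat ≤ l.length := Int.toNat_le.mpr (not_lt.mp hlt)
      rw [Nat.cast_sub hstL, Int.toNat_of_nonneg hst2] at h2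
      exact ⟨le_trans (max_le hst1 hst2) (le_add_of_nonneg_right h0r),
             add_le_of_le_sub_left h2⟩
theorem pvDecA (l tg : List Char) (start_index : Int) (_h1 : ¬ start_index = -1)
    (h2 : ¬ PySem.Chars.findFrom l ('<' :: '/' :: (tg ++ ['>'])) start_index none = -1) :
    (if PySem.Chars.findFrom l ('<' :: tg)
          (PySem.Chars.findFrom l ('<' :: '/' :: (tg ++ ['>'])) start_index none
            + (('<' :: '/' :: (tg ++ ['>'])).length : Int)) none = -1 then 0
     else l.length + 2 -
        (PySem.Chars.findFrom l ('<' :: tg)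
          (PySem.Chars.findFrom l ('<' :: '/' :: (tg ++ ['>'])) start_index none
            + (('<' :: '/' :: (tg ++ ['>'])).length : Int)) none).toNat)
    < if start_index = -1 then 0 else l.length + 2 - start_index.toNat := by
  have hb1 := pvFF_bound l ('<' :: '/' :: (tg ++ ['>'])) start_index
  have hm : 3 ≤ (('<' :: '/' :: (tg ++ ['>'])).length : Int) := by
    rw [show ('<' :: '/' :: (tg ++ ['>'])).length = tg.length + 3 from by simp]
    push_cast
    exact le_add_of_nonneg_left (by positivity)
  generalize hg1 : (('<' :: '/' :: (tg ++ ['>'])).length : Int) = m at hm ⊢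
  clear hg1
  generalize hg2 : PySem.Chars.findFrom l ('<' :: '/' :: (tg ++ ['>'])) start_index none = e at hb1 h2 ⊢
  clear hg2
  have hb2 := pvFF_bound l ('<' :: tg) (e + m)
  generalize hg3 : PySem.Chars.findFrom l ('<' :: tg) (e + m) none = s2 at hb2 ⊢
  clear hg3
  rw [if_neg _h1]
  rcases hb1 with he | ⟨hA, hB⟩
  · exact absurd he h2
  have hsiL : start_index.toNat ≤ l.length :=
    Int.toNat_le.mpr (le_trans (le_trans (le_max_left _ 0) hA) hB)
  have hsiL2 : start_index.toNat < l.length + 2 :=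
    Nat.lt_of_le_of_lt hsiL (Nat.lt_add_of_pos_right (by decide))
  rcases hb2 with hs | ⟨hC, hD⟩
  · rw [if_pos hs]
    exact Nat.sub_pos_of_lt hsiL2
  · have h0s2 : (0:Int) < s2 :=
      lt_of_lt_of_le (lt_of_lt_of_le (by decide : (0:Int) < 3) hm)
        (le_trans (le_add_of_nonneg_left (le_trans (le_max_right _ 0) hA))
          (le_trans (le_max_left _ 0) hC))
    have hs2 : ¬ s2 = -1 := by
      intro h
      rw [h] at h0s2
      exact absurd h0s2 (by decide)
    rw [if_neg hs2]
    refine Nat.sub_lt_sub_left hsiL2 ?_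
    refine (Int.toNat_lt_toNat h0s2).mpr ?_
    calc start_index ≤ e := le_trans (le_max_left _ 0) hA
      _ < e + m := lt_add_of_pos_right e (lt_of_lt_of_le (by decide) hm)
      _ ≤ s2 := le_trans (le_max_left _ 0) hC
def loopA (l tg : List Char) (count : Int) (start_index : Int) : Int :=
  if start_index = -1 then count
  else
    let et : List Char := '<' :: '/' :: (tg ++ ['>'])
    let end_index := PySem.Chars.findFrom l et start_index none
    if end_index = -1 then count
    else loopA l tg (count + 1) (PySem.Chars.findFrom l ('<' :: tg) (end_index + (et.length : Int)) none)
  termination_by (if start_index = -1 then 0 else l.length + 2 - start_index.toNat)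
  decreasing_by
    exact pvDecA l tg start_index ‹_› ‹_›

def countTags (html : String) (tag : String) : Int :=
  loopA html.toList tag.toList 0 (PySem.Chars.find html.toList ('<' :: tag.toList))

-- ===== PORT B =====

-- termination measure facts for scanB's decreasing_by (each step consumes input or flips the state bit once)
theorem pvDecB1 (tg l : List Char) (se : Bool) (_h1 : se = true)
    (h : ('<' :: '/' :: (tg ++ ['>'])).isPrefixOf l = true) :
    (2 * (List.drop ('<' :: '/' :: (tg ++ ['>'])).length l).length + if False then 0 else 1) <
      2 * l.length + if se = true then 0 else 1 := by
  subst _h1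
  have h2 := List.IsPrefix.length_le (List.isPrefixOf_iff_prefix.mp h)
  have h3 : 0 < ('<' :: '/' :: (tg ++ ['>'])).length := by simp
  rw [List.length_drop]
  generalize ('<' :: '/' :: (tg ++ ['>'])).length = m at h2 h3 ⊢
  simp only [reduceIte]
  omega
theorem pvDecB2 (se : Bool) (h : se = true) (x : Char) (t : List Char) :
    (2 * t.length + if True then 0 else 1) < 2 * (x :: t).length + if se = true then 0 else 1 := by
  simp [h]

theorem pvDecB3 (se : Bool) (h : ¬ se = true) (l : List Char) :
    (2 * l.length + if True then 0 else 1) < 2 * l.length + if se = true then 0 else 1 := by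
  simp [h]

theorem pvDecB4 (se : Bool) (h : ¬ se = true) (x : Char) (t : List Char) :
    (2 * t.length + if False then 0 else 1) < 2 * (x :: t).length + if se = true then 0 else 1 := by
  simp [h]

-- B's while loop: one pass over the remaining suffix, seekingEnd is the state bit
def scanB (l tg : List Char) (seekingEnd : Bool) (count : Int) : Int :=
  if seekingEnd then
    if ('<' :: '/' :: (tg ++ ['>'])).isPrefixOf l then
      scanB (l.drop ('<' :: '/' :: (tg ++ ['>'])).length) tg false (count + 1)
    else
      match l with
      | [] => count
      | _ :: t => scanB t tg true count
  else
    if ('<' :: tg).isPrefixOf l then scanB l tg true count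
    else
      match l with
      | [] => count
      | _ :: t => scanB t tg false count
  termination_by 2 * l.length + (if seekingEnd then 0 else 1)
  decreasing_by
    · exact pvDecB1 tg l seekingEnd ‹_› ‹_›
    · exact pvDecB2 seekingEnd ‹_› _ _
    · exact pvDecB3 seekingEnd ‹_› _
    · exact pvDecB4 seekingEnd ‹_› _ _

def countTags_alt (html : String) (tag : String) : Int :=
  scanB html.toList tag.toList false 0

-- ===== PRECONDITION & SPEC =====
def Spec_countTags (html : String) (tag : String) (out : Int) : Prop := out = countTags_alt html tag
instance (html : String) (tag : String) (out : Int) : Decidable (Spec_countTags html tag out) := by unfold Spec_countTags; infer_instance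

-- ===== CLAIM (what is proved, stated in full; the proofs are below) =====
def Claim_equal_countTags : Prop := ∀ (html : String) (tag : String), Dom_countTags html tag → Spec_countTags html tag (countTags html tag)

-- ===== LEMMAS AND PROOFS =====

theorem pvFF_past (l sub : List Char) (t : Int) (h : (l.length : Int) < t) :
    PySem.Chars.findFrom l sub t none = -1 := by
  simp only [PySem.Chars.findFrom]
  split_ifs <;> omega
theorem scanB_start_none (l tg : List Char) (c : Int)
    (h : ¬ ('<' :: tg) <:+: l) : scanB l tg false c = c := by
  induction l with
  | nil => rw [scanB]; simp
  | cons x t ih =>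
    rw [scanB]
    have hnp : ('<' :: tg).isPrefixOf (x :: t) = false := by
      rw [Bool.eq_false_iff]
      intro hp
      exact h (List.IsPrefix.isInfix (List.isPrefixOf_iff_prefix.mp hp))
    simp only [Bool.false_eq_true, if_false, hnp]
    exact ih (fun hi => h (List.infix_cons hi))

theorem scanB_start_step (tg : List Char) (m : Nat) :
    ∀ (l : List Char) (c : Int), (∀ i < m, ¬ ('<' :: tg) <+: l.drop i) →
      ('<' :: tg) <+: l.drop m → scanB l tg false c = scanB (l.drop m) tg true c := by
  induction m with
  | zero =>
    intro l c _ hm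
    rw [scanB.eq_def]
    simp only [List.isPrefixOf_iff_prefix.mpr (by simpa using hm), if_true, List.drop_zero,
      Bool.false_eq_true, if_false]
  | succ m ih =>
    intro l c hlt hm
    have hne : l ≠ [] := by
      intro he; subst he; simp at hm
    obtain ⟨x, t, rfl⟩ := List.exists_cons_of_ne_nil hne
    have hnp : ('<' :: tg).isPrefixOf (x :: t) = false := by
      rw [Bool.eq_false_iff]
      intro hp
      exact hlt 0 (Nat.succ_pos m) (by simpa using List.isPrefixOf_iff_prefix.mp hp)
    rw [scanB]
    simp only [Bool.false_eq_true, if_false, hnp]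
    have := ih t c (fun i hi => by simpa using hlt (i + 1) (by omega)) (by simpa using hm)
    simpa using this

theorem scanB_end_none (l tg : List Char) (c : Int)
    (h : ¬ ('<' :: '/' :: (tg ++ ['>'])) <:+: l) : scanB l tg true c = c := by
  induction l with
  | nil => rw [scanB]; simp
  | cons x t ih =>
    rw [scanB]
    have hnp : ('<' :: '/' :: (tg ++ ['>'])).isPrefixOf (x :: t) = false := by
      rw [Bool.eq_false_iff]
      intro hp
      exact h (List.IsPrefix.isInfix (List.isPrefixOf_iff_prefix.mp hp))
    simp only [if_true, Bool.false_eq_true, if_false, hnp]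
    exact ih (fun hi => h (List.infix_cons hi))

theorem scanB_end_step (tg : List Char) (m : Nat) :
    ∀ (l : List Char) (c : Int), (∀ i < m, ¬ ('<' :: '/' :: (tg ++ ['>'])) <+: l.drop i) →
      ('<' :: '/' :: (tg ++ ['>'])) <+: l.drop m →
      scanB l tg true c = scanB (l.drop (m + (tg.length + 3))) tg false (c + 1) := by
  induction m with
  | zero =>
    intro l c _ hm
    rw [scanB.eq_def]
    simp only [List.isPrefixOf_iff_prefix.mpr (by simpa using hm), if_true]
    have hlen : ('<' :: '/' :: (tg ++ ['>'])).length = tg.length + 3 := by simp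
    rw [hlen]
    norm_num
  | succ m ih =>
    intro l c hlt hm
    have hne : l ≠ [] := by
      intro he; subst he; simp at hm
    obtain ⟨x, t, rfl⟩ := List.exists_cons_of_ne_nil hne
    have hnp : ('<' :: '/' :: (tg ++ ['>'])).isPrefixOf (x :: t) = false := by
      rw [Bool.eq_false_iff]
      intro hp
      exact hlt 0 (Nat.succ_pos m) (by simpa using List.isPrefixOf_iff_prefix.mp hp)
    rw [scanB]
    simp only [if_true, Bool.false_eq_true, if_false, hnp]
    have := ih t c (fun i hi => by simpa using hlt (i + 1) (by omega)) (by simpa using hm)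
    rw [this]
    congr 1
    rw [show m + 1 + (tg.length + 3) = (m + (tg.length + 3)) + 1 from by omega,
      List.drop_succ_cons]

theorem loopA_neg (l tg : List Char) (c : Int) : loopA l tg c (-1) = c := by
  rw [loopA.eq_def]; simp

theorem loopA_step (l tg : List Char) (c si : Int) (h : ¬ si = -1) :
    loopA l tg c si =
      (if PySem.Chars.findFrom l ('<' :: '/' :: (tg ++ ['>'])) si none = -1 then c
       else loopA l tg (c + 1)
         (PySem.Chars.findFrom l ('<' :: tg)
           (PySem.Chars.findFrom l ('<' :: '/' :: (tg ++ ['>'])) si none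
             + (('<' :: '/' :: (tg ++ ['>'])).length : Int)) none)) := by
  rw [loopA.eq_def]
  simp [h]

theorem main_loop (l tg : List Char) :
    ∀ (n k : Nat) (c : Int), l.length - k = n → k ≤ l.length →
      loopA l tg c (PySem.Chars.findFrom l ('<' :: tg) (k : Int) none) = scanB (l.drop k) tg false c := by
  intro n
  induction n using Nat.strong_induction_on with
  | _ n ih =>
    intro k c hn hk
    rw [PySem.Chars.findFrom_natCast l ('<' :: tg) k hk]
    by_cases hp : PySem.Chars.find (l.drop k) ('<' :: tg) = -1
    · rw [if_pos hp, loopA_neg]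
      exact (scanB_start_none _ _ _ ((PySem.Chars.find_eq_neg_one_iff _ _).mp hp)).symm
    · rw [if_neg hp]
      have hp0 : 0 ≤ PySem.Chars.find (l.drop k) ('<' :: tg) := by
        have := PySem.Chars.neg_one_le_find (l.drop k) ('<' :: tg); omega
      obtain ⟨hpre, hmin⟩ := PySem.Chars.find_spec hp0
      have hplen : PySem.Chars.find (l.drop k) ('<' :: tg) ≤ (l.drop k).length :=
        PySem.Chars.find_le_length _ _
      simp only [List.length_drop] at hplen
      have hk1 : k + (PySem.Chars.find (l.drop k) ('<' :: tg)).toNat ≤ l.length := by omega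
      have hcast : (k : Int) + PySem.Chars.find (l.drop k) ('<' :: tg)
          = ((k + (PySem.Chars.find (l.drop k) ('<' :: tg)).toNat : Nat) : Int) := by
        push_cast; omega
      have hdd : (l.drop k).drop (PySem.Chars.find (l.drop k) ('<' :: tg)).toNat
          = l.drop (k + (PySem.Chars.find (l.drop k) ('<' :: tg)).toNat) := List.drop_drop
      have hstart := scanB_start_step tg (PySem.Chars.find (l.drop k) ('<' :: tg)).toNat (l.drop k) c hmin hpre
      rw [hdd] at hstart
      set k1 : Nat := k + (PySem.Chars.find (l.drop k) ('<' :: tg)).toNat with hk1def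
      rw [hcast, loopA_step l tg c _ (by omega)]
      rw [PySem.Chars.findFrom_natCast l ('<' :: '/' :: (tg ++ ['>'])) k1 hk1]
      by_cases hq : PySem.Chars.find (l.drop k1) ('<' :: '/' :: (tg ++ ['>'])) = -1
      · rw [if_pos hq, hstart]
        exact (scanB_end_none _ _ _ ((PySem.Chars.find_eq_neg_one_iff _ _).mp hq)).symm
      · rw [if_neg hq]
        have hq0 : 0 ≤ PySem.Chars.find (l.drop k1) ('<' :: '/' :: (tg ++ ['>'])) := by
          have := PySem.Chars.neg_one_le_find (l.drop k1) ('<' :: '/' :: (tg ++ ['>'])); omega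
        obtain ⟨hqpre, hqmin⟩ := PySem.Chars.find_spec hq0
        have hqlen : PySem.Chars.find (l.drop k1) ('<' :: '/' :: (tg ++ ['>'])) ≤ (l.drop k1).length :=
          PySem.Chars.find_le_length _ _
        simp only [List.length_drop] at hqlen
        set q : Nat := (PySem.Chars.find (l.drop k1) ('<' :: '/' :: (tg ++ ['>'])) ).toNat with hqdef
        set k2 : Nat := k1 + q + (tg.length + 3) with hk2def
        have hcast2 : (k1 : Int) + PySem.Chars.find (l.drop k1) ('<' :: '/' :: (tg ++ ['>']))
            + (('<' :: '/' :: (tg ++ ['>'])).length : Int) = ((k2 : Nat) : Int) := by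
          have hlen3 : ('<' :: '/' :: (tg ++ ['>'])).length = tg.length + 3 := by simp
          rw [hlen3, hk2def]
          push_cast
          omega
        rw [hcast2]
        have hend := scanB_end_step tg q (l.drop k1) c hqmin hqpre
        rw [List.drop_drop, show k1 + (q + (tg.length + 3)) = k2 from by omega] at hend
        have hL : loopA l tg (c + 1) (PySem.Chars.findFrom l ('<' :: tg) (k2 : Int) none)
            = scanB (l.drop k2) tg false (c + 1) := by
          by_cases hk2 : k2 ≤ l.length
          · exact ih (l.length - k2) (by omega) k2 (c + 1) rfl hk2
          · rw [pvFF_past l ('<' :: tg) (k2 : Int) (by omega), loopA_neg]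
            rw [List.drop_eq_nil_iff.mpr (by omega)]
            exact (scanB_start_none _ _ _ (by intro hi; simp at hi)).symm
        rw [hL, hstart, hend,
          if_neg (show ¬((k1 : Int) + PySem.Chars.find (List.drop k1 l) ('<' :: '/' :: (tg ++ ['>'])) = -1) from by omega)]

-- ===== VERDICT (by name: the statement is the Claim_ definition above) =====
theorem countTags_spec : Claim_equal_countTags := by
  intro html tag _
  unfold Spec_countTags countTags countTags_alt
  have := main_loop html.toList tag.toList (html.toList.length) 0 0 rfl (Nat.zero_le _)
  simpa using this
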